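-- pv_equiv track=rewrite | github.com/HomelessChicken78/ITS-Esercizi | Cybersecurity/Cifratura_RSA.py | message_to_int
-- ===== SOURCE A (Python) =====
-- def message_to_int(m: str) -> int:
--         asciified: list[int] = [ord(char) for char in m]
--         res: int = 0
--         count: int = 0
--
--         for num in asciified[::-1]:
--             res += num*(256**count)
--             count += 1
--
--         return res
-- ===== SOURCE B (Python) =====
-- def message_to_int(m: str) -> int:
--     # Horner scheme left-to-right: one multiply-add per character, no powers.
--     res = 0
--     for char in m:
--         res = res * 256 + ord(char)
--     return res
-- ===== Notes on version B (the rewrite author's own statement) =====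
-- stated objective: faster
-- what changed: Replaces the reversed-order loop that recomputes 256**count for each position with a single left-to-right Horner scheme (res = res*256 + ord(c)), one multiply-add per character.
import Mathlib
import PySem

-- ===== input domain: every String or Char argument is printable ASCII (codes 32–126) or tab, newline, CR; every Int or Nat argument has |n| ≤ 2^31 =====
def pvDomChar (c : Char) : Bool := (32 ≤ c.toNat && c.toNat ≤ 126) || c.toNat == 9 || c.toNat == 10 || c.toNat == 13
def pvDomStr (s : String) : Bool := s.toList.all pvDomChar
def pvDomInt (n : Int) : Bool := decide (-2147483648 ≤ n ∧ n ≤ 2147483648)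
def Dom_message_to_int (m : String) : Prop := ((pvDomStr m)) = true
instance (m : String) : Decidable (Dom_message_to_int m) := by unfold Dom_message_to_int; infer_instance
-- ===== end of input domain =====

-- B replaces A's reversed loop with per-position powers 256**count by a left-to-right Horner
-- scheme (res = res*256 + ord(c)): one multiply-add per character (objective: faster).

-- ===== PORT A =====
-- A: list of code points, reversed via m[::-1]-style slice, then res += num*256^count, count += 1.
def message_to_int (m : String) : Int :=
  let asciified : List Int := m.toList.map (fun c => (c.toNat : Int))
  let rev : List Int := (PySem.List.slice? asciified none none (-1)).getD []
  (rev.foldl (fun (st : Int × Nat) num => (st.1 + num * 256 ^ st.2, st.2 + 1)) (0, 0)).1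

-- ===== PORT B =====
def message_to_int_alt (m : String) : Int :=
  m.toList.foldl (fun res c => res * 256 + (c.toNat : Int)) 0

-- ===== PRECONDITION & SPEC =====
def Spec_message_to_int (m : String) (out : Int) : Prop := out = message_to_int_alt m
instance (m : String) (out : Int) : Decidable (Spec_message_to_int m out) := by unfold Spec_message_to_int; infer_instance

-- ===== CLAIM (what is proved, stated in full; the proofs are below) =====
def Claim_equal_message_to_int : Prop := ∀ (m : String), Dom_message_to_int m → Spec_message_to_int m (message_to_int m)

-- ===== LEMMAS AND PROOFS =====

theorem pv_horner_append (l : List Int) (x a : Int) :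
    (l ++ [x]).foldl (fun res c => res * 256 + c) a
      = (l.foldl (fun res c => res * 256 + c) a) * 256 + x := by
  simp [List.foldl_append]

-- A's loop over l with state (r, c) returns r + 256^c * Horner(l.reverse).
theorem pv_loopA_eq (l : List Int) (r : Int) (c : Nat) :
    (l.foldl (fun (st : Int × Nat) num => (st.1 + num * 256 ^ st.2, st.2 + 1)) (r, c)).1
      = r + 256 ^ c * (l.reverse.foldl (fun res x => res * 256 + x) 0) := by
  induction l generalizing r c with
  | nil => simp
  | cons x xs ih =>
      simp only [List.foldl_cons, List.reverse_cons, ih, pv_horner_append]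
      ring

-- ===== VERDICT (by name: the statement is the Claim_ definition above) =====
theorem message_to_int_spec : Claim_equal_message_to_int := by
  intro m _
  show _ = _
  simp only [message_to_int, message_to_int_alt,
    PySem.List.slice?_none_none_neg_one, Option.getD_some]
  rw [pv_loopA_eq]
  simp [List.foldl_map]
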